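-- pv_equiv track=rewrite | github.com/PaulNovack/pauls-burgers | asr-service/whiteListServer.py | build_initial_prompt
-- ===== SOURCE A (Python) =====
-- from typing import List, Optional, Tuple
--
-- def build_initial_prompt(vocab: List[str], max_chars: int = 2000) -> str:
--     """
--     Join vocab into a space-separated prompt but cap length to avoid huge prompts.
--     """
--     if not vocab:
--         return ""
--     acc, total = [], 0
--     for w in vocab:
--         if total + len(w) + 1 > max_chars:
--             break
--         acc.append(w)
--         total += len(w) + 1
--     return " ".join(acc)
-- ===== SOURCE B (Python) =====
-- from itertools import accumulate
-- from bisect import bisect_right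
-- from typing import List
--
-- def build_initial_prompt(vocab: List[str], max_chars: int = 2000) -> str:
--     prefixes = list(accumulate(len(w) + 1 for w in vocab))
--     k = bisect_right(prefixes, max_chars)
--     return " ".join(vocab[:k])
-- ===== Notes on version B (the rewrite author's own statement) =====
-- stated objective: alternative
-- what changed: Replaces the incremental append-and-break loop with a cumulative prefix-sum table plus a bisect_right cutoff and a single slice/join.
import Mathlib
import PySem

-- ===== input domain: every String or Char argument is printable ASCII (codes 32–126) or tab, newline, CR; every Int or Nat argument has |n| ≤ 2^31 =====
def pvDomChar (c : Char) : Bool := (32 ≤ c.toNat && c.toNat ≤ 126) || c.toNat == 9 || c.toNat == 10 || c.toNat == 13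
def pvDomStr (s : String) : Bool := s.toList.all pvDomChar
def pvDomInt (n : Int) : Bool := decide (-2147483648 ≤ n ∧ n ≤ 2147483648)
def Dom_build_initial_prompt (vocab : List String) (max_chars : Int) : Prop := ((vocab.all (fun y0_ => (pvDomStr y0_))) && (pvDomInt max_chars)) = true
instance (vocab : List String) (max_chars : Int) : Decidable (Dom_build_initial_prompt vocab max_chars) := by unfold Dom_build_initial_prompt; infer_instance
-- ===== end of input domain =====

-- B replaces A's incremental append-and-break loop with a prefix-sum table, a bisect_right
-- cutoff and a single slice/join (alternative decomposition, same cost).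


-- ===== PORT A =====
-- the for-loop with break: state (acc, total); acc is accumulated reversed (cons) and
-- reversed once at the end — the standard linear transliteration of Python's list.append
def pvALoop (max_chars : Int) (ws : List String) (acc : List String) (total : Int) : List String :=
  match ws with
  | [] => acc.reverse
  | w :: rest =>
      if total + PySem.Str.len w + 1 > max_chars then acc.reverse
      else pvALoop max_chars rest (w :: acc) (total + PySem.Str.len w + 1)

def build_initial_prompt (vocab : List String) (max_chars : Int) : String :=
  match vocab with
  | [] => ""
  | _ => PySem.Str.join " " (pvALoop max_chars vocab [] 0)

-- ===== PORT B =====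
-- list(accumulate(len(w)+1 for w in vocab))
def pvAccum (ws : List String) (t : Int) : List Int :=
  match ws with
  | [] => []
  | w :: rest => (t + PySem.Str.len w + 1) :: pvAccum rest (t + PySem.Str.len w + 1)

-- bisect.bisect_right on a sorted list = number of elements ≤ x (exact here: pvAccum is strictly increasing)
def pvBisectRight (xs : List Int) (x : Int) : Nat :=
  (xs.takeWhile (fun p => decide (p ≤ x))).length

def build_initial_prompt_alt (vocab : List String) (max_chars : Int) : String :=
  let prefixes := pvAccum vocab 0
  let k := pvBisectRight prefixes max_chars
  PySem.Str.join " " (vocab.take k)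

-- ===== PRECONDITION & SPEC =====
def Spec_build_initial_prompt (vocab : List String) (max_chars : Int) (out : String) : Prop := out = build_initial_prompt_alt vocab max_chars
instance (vocab : List String) (max_chars : Int) (out : String) : Decidable (Spec_build_initial_prompt vocab max_chars out) := by unfold Spec_build_initial_prompt; infer_instance

-- ===== CLAIM (what is proved, stated in full; the proofs are below) =====
def Claim_equal_build_initial_prompt : Prop := ∀ (vocab : List String) (max_chars : Int), Dom_build_initial_prompt vocab max_chars → Spec_build_initial_prompt vocab max_chars (build_initial_prompt vocab max_chars)

-- ===== LEMMAS AND PROOFS =====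

theorem pvALoop_eq_take (max_chars : Int) (ws : List String) :
    ∀ (t : Int) (acc : List String),
      pvALoop max_chars ws acc t = acc.reverse ++ ws.take (pvBisectRight (pvAccum ws t) max_chars) := by
  induction ws with
  | nil =>
      intro t acc
      simp only [pvALoop, pvAccum, pvBisectRight, List.takeWhile_nil, List.length_nil,
        List.take_nil, List.append_nil]
  | cons w rest ih =>
      intro t acc
      by_cases h : t + PySem.Str.len w + 1 > max_chars
      · have hd : decide (t + PySem.Str.len w + 1 ≤ max_chars) = false := by
          simp only [decide_eq_false_iff_not]; omega
        simp only [pvALoop, pvAccum, pvBisectRight, List.takeWhile, hd, if_pos h,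
          List.length_nil, List.take_zero, List.append_nil]
      · have h' : t + PySem.Str.len w + 1 ≤ max_chars := by omega
        have hd : decide (t + PySem.Str.len w + 1 ≤ max_chars) = true := decide_eq_true h'
        simp only [pvALoop, pvAccum, pvBisectRight, List.takeWhile, hd, if_neg h]
        rw [ih]
        simp only [pvBisectRight, List.reverse_cons, List.length_cons, List.take_succ_cons,
          List.append_assoc, List.singleton_append]

theorem build_initial_prompt_spec : Claim_equal_build_initial_prompt := by
  intro vocab max_chars _
  show build_initial_prompt vocab max_chars = build_initial_prompt_alt vocab max_chars
  cases vocab with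
  | nil => rfl
  | cons w rest =>
      simp only [build_initial_prompt, build_initial_prompt_alt]
      rw [pvALoop_eq_take]
      rfl
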